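-- pv_equiv track=rewrite | github.com/pwgraham91/Python-Exercises | inflight_entertainment.py | find_movies_within_x_minutes
-- ===== SOURCE A (Python) =====
-- from typing import List, Tuple, Optional
--
-- def find_movies_within_x_minutes(flight_length: int, movie_runtime_list: List[int], stretch_space=20) -> bool:
--     sorted_movies = sorted(movie_runtime_list)
--     reverse_sorted_movies = list(reversed(sorted_movies))
--     reverse_distance = 0
--     for forward_count, forward in enumerate(sorted_movies):
--         current_reverse_distance = reverse_distance
--         if forward_count - len(movie_runtime_list) >= current_reverse_distance:
--             # don't go forward over items we should already be skipping
--             break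
--         for backward_count, backward in enumerate(reverse_sorted_movies[current_reverse_distance:]):
--             if forward_count >= len(movie_runtime_list) - current_reverse_distance - backward_count - 1:
--                 # forward and backward are the same, don't invert the two tracers
--                 break
--             combined_length = forward + backward
--             desired_length = abs(combined_length - flight_length)
--
--             if desired_length <= stretch_space:
--                 return True
--
--             if combined_length - stretch_space > flight_length:
--                 # backward number is too big
--                 reverse_distance += 1
--
--             if combined_length + stretch_space < flight_length:
--                 # forward number is too small
--                 break
--
--     return False
-- ===== SOURCE B (Python) =====
-- def find_movies_within_x_minutes(flight_length, movie_runtime_list, stretch_space=20):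
--     movies = sorted(movie_runtime_list)
--     lo = 0
--     hi = len(movies) - 1
--     while lo < hi:
--         total = movies[lo] + movies[hi]
--         if abs(total - flight_length) <= stretch_space:
--             return True
--         if total - flight_length > stretch_space:
--             hi -= 1
--         else:
--             lo += 1
--     return False
-- ===== Notes on version B (the rewrite author's own statement) =====
-- stated objective: alternative
-- what changed: Replaced A's nested forward/backward tracer scan with a mutated reverse_distance and per-iteration re-slicing of the reversed sorted list by the standard sort + two-pointer sweep that moves lo/hi once per step.
import Mathlib
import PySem

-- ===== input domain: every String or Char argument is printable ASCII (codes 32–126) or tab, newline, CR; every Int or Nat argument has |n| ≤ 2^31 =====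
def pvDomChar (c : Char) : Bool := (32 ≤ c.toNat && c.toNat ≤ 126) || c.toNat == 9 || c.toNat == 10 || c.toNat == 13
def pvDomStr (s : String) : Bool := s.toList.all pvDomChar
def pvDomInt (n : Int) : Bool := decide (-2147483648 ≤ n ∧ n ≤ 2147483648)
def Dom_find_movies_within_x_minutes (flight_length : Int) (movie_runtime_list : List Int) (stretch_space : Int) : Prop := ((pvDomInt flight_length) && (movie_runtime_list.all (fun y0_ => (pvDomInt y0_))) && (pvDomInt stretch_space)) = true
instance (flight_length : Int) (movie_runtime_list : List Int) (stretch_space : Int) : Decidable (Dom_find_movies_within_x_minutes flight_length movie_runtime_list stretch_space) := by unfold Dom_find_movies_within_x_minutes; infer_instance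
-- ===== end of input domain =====

-- B replaces A's nested forward/backward tracer scan (which re-slices the reversed list
-- every outer iteration) with the standard sort + two-pointer sweep for "some pair of
-- movies sums within stretch_space of flight_length": a different algorithm, proved to
-- return the same Bool on every input.

-- ===== PORT A =====
-- A's inner 'for backward_count, backward in enumerate(reverse_sorted_movies[current_reverse_distance:])'
-- loop: bc carries the enumerate counter, rd the mutable reverse_distance;
-- returns (whether 'return True' fired, reverse_distance after the loop).
def fmInnerA (fl st n crd fc forward : Int) : List Int → Nat → Int → Bool × Int
  | [], _, rd => (false, rd)
  | backward :: rest, bc, rd =>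
    if fc ≥ n - crd - (bc : Int) - 1 then (false, rd)
    else
      let combined := forward + backward
      let desired := |combined - fl|
      if desired ≤ st then (true, rd)
      else
        let rd' := if combined - st > fl then rd + 1 else rd
        if combined + st < fl then (false, rd')
        else fmInnerA fl st n crd fc forward rest (bc + 1) rd'

-- A's outer 'for forward_count, forward in enumerate(sorted_movies)' loop.
def fmOuterA (fl st n : Int) (rev : List Int) : List Int → Nat → Int → Bool
  | [], _, _ => false
  | forward :: rest, fc, rd =>
    if (fc : Int) - n ≥ rd then false
    else
      let r := fmInnerA fl st n rd (fc : Int) forward (PySem.List.slice rev (some rd) none) 0 rd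
      if r.1 then true else fmOuterA fl st n rev rest (fc + 1) r.2

def find_movies_within_x_minutes (flight_length : Int) (movie_runtime_list : List Int) (stretch_space : Int) : Bool :=
  let sorted_movies := PySem.List.sorted movie_runtime_list (fun x => x) false
  let reverse_sorted_movies := sorted_movies.reverse
  fmOuterA flight_length stretch_space (movie_runtime_list.length : Int) reverse_sorted_movies sorted_movies 0 0

-- ===== PORT B =====
-- Source B's 'while lo < hi' two-pointer sweep over the sorted list
def fmTwoPtr (fl st : Int) (movies : List Int) (lo hi : Int) : Bool :=
  if h : lo < hi then
    let total := PySem.List.pyGetD movies lo 0 + PySem.List.pyGetD movies hi 0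
    if |total - fl| ≤ st then true
    else if total - fl > st then fmTwoPtr fl st movies lo (hi - 1)
    else fmTwoPtr fl st movies (lo + 1) hi
  else false
termination_by (hi - lo).toNat
decreasing_by all_goals omega

def find_movies_within_x_minutes_alt (flight_length : Int) (movie_runtime_list : List Int) (stretch_space : Int) : Bool :=
  let movies := PySem.List.sorted movie_runtime_list (fun x => x) false
  fmTwoPtr flight_length stretch_space movies 0 ((movies.length : Int) - 1)

-- ===== PRECONDITION & SPEC =====
def Spec_find_movies_within_x_minutes (flight_length : Int) (movie_runtime_list : List Int) (stretch_space : Int) (out : Bool) : Prop := out = find_movies_within_x_minutes_alt flight_length movie_runtime_list stretch_space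
instance (flight_length : Int) (movie_runtime_list : List Int) (stretch_space : Int) (out : Bool) : Decidable (Spec_find_movies_within_x_minutes flight_length movie_runtime_list stretch_space out) := by unfold Spec_find_movies_within_x_minutes; infer_instance

-- ===== CLAIM (what is proved, stated in full; the proofs are below) =====
def Claim_equal_find_movies_within_x_minutes : Prop := ∀ (flight_length : Int) (movie_runtime_list : List Int) (stretch_space : Int), Dom_find_movies_within_x_minutes flight_length movie_runtime_list stretch_space → Spec_find_movies_within_x_minutes flight_length movie_runtime_list stretch_space (find_movies_within_x_minutes flight_length movie_runtime_list stretch_space)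

-- ===== LEMMAS AND PROOFS =====

-- fmG m i: the element both ports read at sorted position i
def fmG (m : List Int) (i : Int) : Int := PySem.List.pyGetD m i 0

-- 'the pair (i, j) of sorted positions is a hit'
def fmGood (fl st : Int) (m : List Int) (i j : Int) : Prop :=
  |fmG m i + fmG m j - fl| ≤ st

theorem fmG_eq_getElem {m : List Int} {i : Int} (h0 : 0 ≤ i) (h : i < (m.length : Int)) :
    fmG m i = m[i.toNat]'(by omega) := by
  unfold fmG
  rw [PySem.List.pyGetD_eq_getElem m 0 h0 h]

theorem fmG_mono {m : List Int} (hm : m.Pairwise (· ≤ ·)) {i j : Int}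
    (h0 : 0 ≤ i) (hij : i ≤ j) (hj : j < (m.length : Int)) : fmG m i ≤ fmG m j := by
  rw [fmG_eq_getElem h0 (by omega), fmG_eq_getElem (by omega) hj]
  rcases eq_or_lt_of_le hij with h | h
  · simp [h]
  · exact (List.pairwise_iff_getElem.mp hm) i.toNat j.toNat (by omega) (by omega) (by omega)

theorem fmTwoPtr_iff {fl st : Int} {m : List Int} (hm : m.Pairwise (· ≤ ·)) :
    ∀ (N : Nat) (lo hi : Int), (hi - lo).toNat ≤ N → 0 ≤ lo → hi < (m.length : Int) →
      (fmTwoPtr fl st m lo hi = true ↔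
        ∃ i j : Int, lo ≤ i ∧ i < j ∧ j ≤ hi ∧ fmGood fl st m i j) := by
  intro N
  induction N with
  | zero =>
    intro lo hi hN h0 hhi
    rw [fmTwoPtr]
    have hle : ¬ lo < hi := by omega
    simp only [hle, dite_false]
    constructor
    · intro h; cases h
    · rintro ⟨i, j, h1, h2, h3, _⟩; omega
  | succ N ih =>
    intro lo hi hN h0 hhi
    rw [fmTwoPtr]
    by_cases hlt : lo < hi
    · simp only [hlt, dite_true]
      have hglo := fmG_eq_getElem (m := m) h0 (by omega)
      have hghi := fmG_eq_getElem (m := m) (i := hi) (by omega) hhi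
      set total := PySem.List.pyGetD m lo 0 + PySem.List.pyGetD m hi 0 with htot
      have htotg : total = fmG m lo + fmG m hi := by simp [fmG, htot]
      by_cases hhit : |total - fl| ≤ st
      · simp only [hhit, if_true]
        constructor
        · intro _
          exact ⟨lo, hi, le_refl _, hlt, le_refl _, by rw [fmGood, ← htotg]; exact hhit⟩
        · intro _; trivial
      · simp only [hhit, if_false]
        by_cases hbig : total - fl > st
        · simp only [hbig, if_true]
          rw [ih lo (hi - 1) (by omega) h0 (by omega)]
          constructor
          · rintro ⟨i, j, h1, h2, h3, h4⟩; exact ⟨i, j, h1, h2, by omega, h4⟩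
          · rintro ⟨i, j, h1, h2, h3, h4⟩
            refine ⟨i, j, h1, h2, ?_, h4⟩
            rcases eq_or_lt_of_le h3 with hj | hj
            · exfalso
              have hgi : fmG m lo ≤ fmG m i := fmG_mono hm h0 h1 (by omega)
              rw [fmGood, hj] at h4
              have := abs_le.mp h4
              omega
            · omega
        · simp only [hbig, if_false]
          rw [ih (lo + 1) hi (by omega) (by omega) hhi]
          constructor
          · rintro ⟨i, j, h1, h2, h3, h4⟩; exact ⟨i, j, by omega, h2, h3, h4⟩
          · rintro ⟨i, j, h1, h2, h3, h4⟩
            refine ⟨i, j, ?_, h2, h3, h4⟩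
            rcases eq_or_lt_of_le h1 with hi' | hi'
            · exfalso
              have hgj : fmG m j ≤ fmG m hi := fmG_mono hm (by omega) h3 hhi
              rw [fmGood, ← hi'] at h4
              have := abs_le.mp h4
              have habs := abs_le.not.mp hhit
              omega
            · omega
    · simp only [hlt, dite_false]
      constructor
      · intro h; cases h
      · rintro ⟨i, j, h1, h2, h3, _⟩; omega



theorem fmInnerA_spec {fl st : Int} {m : List Int} (hm : m.Pairwise (· ≤ ·))
    {n : Nat} (hn : n = m.length) {crd fc : Int}
    (hcrd : 0 ≤ crd) (hfc0 : 0 ≤ fc) (hfcn : fc < (n : Int)) :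
    ∀ (bs : List Int) (bc : Nat) (rd : Int),
      bs = m.reverse.drop (crd.toNat + bc) →
      crd ≤ rd → rd ≤ crd + (bc : Int) →
      (∀ i j : Int, fc ≤ i → i < j → j < (n : Int) → (n : Int) - rd ≤ j →
        ¬ fmGood fl st m i j) →
      (((fmInnerA fl st (n : Int) crd fc (fmG m fc) bs bc rd).1 = true →
          ∃ j : Int, fc < j ∧ j < (n : Int) ∧ fmGood fl st m fc j) ∧
       ((fmInnerA fl st (n : Int) crd fc (fmG m fc) bs bc rd).1 = false →
         (∀ j : Int, fc < j → j ≤ (n : Int) - 1 - crd - (bc : Int) → ¬ fmGood fl st m fc j) ∧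
         rd ≤ (fmInnerA fl st (n : Int) crd fc (fmG m fc) bs bc rd).2 ∧
         (∀ i j : Int, fc ≤ i → i < j → j < (n : Int) →
            (n : Int) - (fmInnerA fl st (n : Int) crd fc (fmG m fc) bs bc rd).2 ≤ j →
           ¬ fmGood fl st m i j))) := by
  intro bs
  induction bs with
  | nil =>
    intro bc rd hbs hrd1 hrd2 Hrd
    have hlen : m.length ≤ crd.toNat + bc := by
      have := List.drop_eq_nil_iff.mp hbs.symm
      simpa using this
    simp only [fmInnerA]
    refine ⟨by intro h; simp at h, ?_⟩
    intro _
    refine ⟨?_, le_refl _, Hrd⟩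
    intro j hj1 hj2 _
    omega
  | cons b rest ih =>
    intro bc rd hbs hrd1 hrd2 Hrd
    have hlen := congrArg List.length hbs
    simp [List.length_drop] at hlen
    have hk : crd.toNat + bc < m.length := by omega
    have hb? : m.reverse[crd.toNat + bc]? = some b := by
      have h : (m.reverse.drop (crd.toNat + bc))[0]? = m.reverse[crd.toNat + bc + 0]? :=
        List.getElem?_drop
      rw [← hbs] at h
      simpa using h.symm
    by_cases hbreak : fc ≥ (n : Int) - crd - (bc : Int) - 1
    · simp only [fmInnerA, hbreak, if_true]
      refine ⟨by intro h; simp at h, ?_⟩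
      intro _
      exact ⟨by intro j hj1 hj2; omega, le_refl _, Hrd⟩
    · have hj0lt : (n : Int) - 1 - crd - (bc : Int) < (n : Int) := by omega
      have hj00 : 0 ≤ (n : Int) - 1 - crd - (bc : Int) := by omega
      have hbg : b = fmG m ((n : Int) - 1 - crd - (bc : Int)) := by
        rw [List.getElem?_reverse (by omega)] at hb?
        rw [fmG_eq_getElem hj00 (by omega)]
        have hidx : ((n : Int) - 1 - crd - (bc : Int)).toNat =
            m.length - 1 - (crd.toNat + bc) := by omega
        have hb2 : m[((n : Int) - 1 - crd - (bc : Int)).toNat]? = some b := by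
          rw [hidx]; exact hb?
        exact ((List.getElem_eq_iff (by omega)).mpr hb2).symm
      by_cases hhit : |fmG m fc + b - fl| ≤ st
      · simp only [fmInnerA, hbreak, if_false, hhit, if_true]
        refine ⟨?_, by intro h; simp at h⟩
        intro _
        refine ⟨(n : Int) - 1 - crd - (bc : Int), by omega, by omega, ?_⟩
        rw [fmGood, ← hbg]
        exact hhit
      · have hnothit : ¬ fmGood fl st m fc ((n : Int) - 1 - crd - (bc : Int)) := by
          rw [fmGood, ← hbg]
          exact hhit
        set rd' : Int := if fmG m fc + b - st > fl then rd + 1 else rd with hrd'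
        have hrd'invar : ∀ i j : Int, fc ≤ i → i < j → j < (n : Int) →
            (n : Int) - rd' ≤ j → ¬ fmGood fl st m i j := by
          intro i j hi hij hjn hjrd
          by_cases hcase : (n : Int) - rd ≤ j
          · exact Hrd i j hi hij hjn hcase
          · have hbig : fmG m fc + b - st > fl := by
              by_contra hnb
              rw [hrd', if_neg hnb] at hjrd
              omega
            have hjval : (n : Int) - rd - 1 ≤ j := by
              rw [hrd', if_pos hbig] at hjrd
              omega
            have hj0j : (n : Int) - 1 - crd - (bc : Int) ≤ j := by omega
            have h1 : fmG m ((n : Int) - 1 - crd - (bc : Int)) ≤ fmG m j :=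
              fmG_mono hm hj00 hj0j (by omega)
            have h2 : fmG m fc ≤ fmG m i := fmG_mono hm hfc0 hi (by omega)
            rw [fmGood]
            rw [hbg] at hbig
            intro habs
            have := abs_le.mp habs
            omega
        have hrd'ge : rd ≤ rd' := by
          rw [hrd']; split_ifs <;> omega
        have hrd'le : rd' ≤ crd + (bc : Int) + 1 := by
          rw [hrd']; split_ifs <;> omega
        by_cases hsmall : fmG m fc + b + st < fl
        · simp only [fmInnerA, hbreak, if_false, hhit, if_true, hsmall]
          refine ⟨by intro h; simp at h, ?_⟩
          intro _
          refine ⟨?_, hrd'ge, hrd'invar⟩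
          intro j hj1 hj2
          rcases eq_or_lt_of_le hj2 with hj | hj
          · rw [hj]; exact hnothit
          · have h1 : fmG m j ≤ fmG m ((n : Int) - 1 - crd - (bc : Int)) :=
              fmG_mono hm (by omega) (by omega) (by omega)
            rw [fmGood]
            rw [hbg] at hsmall
            intro habs
            have := abs_le.mp habs
            omega
        · simp only [fmInnerA, hbreak, if_false, hhit, hsmall]
          have hrest : rest = m.reverse.drop (crd.toNat + bc + 1) := by
            have := congrArg List.tail hbs
            simpa [List.tail_drop] using this
          have hres := ih (bc + 1) rd' (by rw [hrest]; congr 1) (by omega)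
            (by push_cast; omega) (by
              intro i j hi hij hjn hjrd
              exact hrd'invar i j hi hij hjn hjrd)
          refine ⟨hres.1, ?_⟩
          intro hfalse
          have h2 := hres.2 hfalse
          refine ⟨?_, le_trans hrd'ge h2.2.1, h2.2.2⟩
          intro j hj1 hj2
          rcases eq_or_lt_of_le hj2 with hj | hj
          · rw [hj]; exact hnothit
          · exact h2.1 j hj1 (by push_cast; omega)


theorem fmOuterA_spec {fl st : Int} {m : List Int} (hm : m.Pairwise (· ≤ ·))
    {n : Nat} (hn : n = m.length) :
    ∀ (fs : List Int) (fc : Nat) (rd : Int),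
      fs = m.drop fc → 0 ≤ rd →
      (∀ i j : Int, (fc : Int) ≤ i → i < j → j < (n : Int) → (n : Int) - rd ≤ j →
        ¬ fmGood fl st m i j) →
      (∀ i j : Int, 0 ≤ i → i < (fc : Int) → i < j → j < (n : Int) →
        ¬ fmGood fl st m i j) →
      (fmOuterA fl st (n : Int) m.reverse fs fc rd = true ↔
        ∃ i j : Int, 0 ≤ i ∧ i < j ∧ j < (n : Int) ∧ fmGood fl st m i j) := by
  intro fs
  induction fs with
  | nil =>
    intro fc rd hbs hrd0 Hrd Hprev
    have hlen : m.length ≤ fc := by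
      have := List.drop_eq_nil_iff.mp hbs.symm
      simpa using this
    simp only [fmOuterA]
    constructor
    · intro h; simp at h
    · rintro ⟨i, j, h1, h2, h3, h4⟩
      exact absurd h4 (Hprev i j h1 (by omega) h2 h3)
  | cons forward rest ih =>
    intro fc rd hbs hrd0 Hrd Hprev
    have hlen := congrArg List.length hbs
    simp [List.length_drop] at hlen
    have hfc : fc < m.length := by omega
    have hfwd? : m[fc]? = some forward := by
      have h : (m.drop fc)[0]? = m[fc + 0]? := List.getElem?_drop
      rw [← hbs] at h
      simpa using h.symm
    have hfwd : forward = fmG m (fc : Int) := by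
      rw [fmG_eq_getElem (by omega) (by omega)]
      have hb2 : m[((fc : Int)).toNat]? = some forward := by
        have h0 : ((fc : Int)).toNat = fc := by omega
        rw [h0]; exact hfwd?
      exact ((List.getElem_eq_iff (by omega)).mpr hb2).symm
    have hrest : rest = m.drop (fc + 1) := by
      have := congrArg List.tail hbs
      simpa [List.tail_drop] using this
    simp only [fmOuterA]
    rw [if_neg (by omega)]
    have hbs' : PySem.List.slice m.reverse (some rd) none =
        m.reverse.drop (rd.toNat + 0) := by
      rw [PySem.List.slice_from m.reverse hrd0]
      simp
    have hspec := fmInnerA_spec hm hn (crd := rd) (fc := (fc : Int)) hrd0 (by omega)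
      (by omega) (PySem.List.slice m.reverse (some rd) none) 0 rd hbs'.symm.symm
      (le_refl rd) (by simp) Hrd
    rw [hfwd]
    by_cases hr : (fmInnerA fl st (n : Int) rd (fc : Int) (fmG m (fc : Int))
        (PySem.List.slice m.reverse (some rd) none) 0 rd).1 = true
    · rw [if_pos hr]
      constructor
      · intro _
        obtain ⟨j, hj1, hj2, hj3⟩ := hspec.1 hr
        exact ⟨(fc : Int), j, by omega, hj1, hj2, hj3⟩
      · intro _; rfl
    · have hrf : (fmInnerA fl st (n : Int) rd (fc : Int) (fmG m (fc : Int))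
          (PySem.List.slice m.reverse (some rd) none) 0 rd).1 = false := by
        revert hr
        cases (fmInnerA fl st (n : Int) rd (fc : Int) (fmG m (fc : Int))
          (PySem.List.slice m.reverse (some rd) none) 0 rd).1 <;> simp
      rw [if_neg hr]
      obtain ⟨ha, hble, hc⟩ := hspec.2 hrf
      refine ih (fc + 1) _ hrest (by omega) ?_ ?_
      · intro i j hi hij hjn hjrd
        exact hc i j (by push_cast at hi ⊢; omega) hij hjn hjrd
      · intro i j h0 hifc hij hjn
        have hio : i < (fc : Int) ∨ i = (fc : Int) := by push_cast at hifc; omega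
        rcases hio with hcase | hcase
        · exact Hprev i j h0 hcase hij hjn
        · subst hcase
          by_cases hj : j ≤ (n : Int) - 1 - rd
          · exact ha j hij (by push_cast; omega)
          · exact Hrd _ j (le_refl _) hij hjn (by omega)


theorem fm_agree (fl : Int) (xs : List Int) (st : Int) :
    find_movies_within_x_minutes fl xs st = find_movies_within_x_minutes_alt fl xs st := by
  unfold find_movies_within_x_minutes find_movies_within_x_minutes_alt
  set m := PySem.List.sorted xs (fun x => x) false with hM
  have hm : m.Pairwise (· ≤ ·) := by
    have := PySem.List.sorted_pairwise xs (fun x => x)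
    simpa [hM] using this
  have hlen : xs.length = m.length := by
    rw [hM, PySem.List.length_sorted]
  have hA := fmOuterA_spec (fl := fl) (st := st) hm (n := m.length) rfl m 0 0
      (List.drop_zero (l := m)).symm (le_refl 0)
      (by intro i j _ _ hjn hjrd; exact absurd hjn (by omega))
      (by intro i j h0 h1 _ _; exact absurd h1 (by push_cast; omega))
  have hB := fmTwoPtr_iff (fl := fl) (st := st) hm
      (((m.length : Int)) - 0).toNat 0 ((m.length : Int) - 1) (by omega) (le_refl 0) (by omega)
  rw [show ((xs.length : Int)) = ((m.length : Int)) from by rw [hlen]]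
  refine Bool.eq_iff_iff.mpr ?_
  rw [hA, hB]
  constructor
  · rintro ⟨i, j, a, b, c, d⟩; exact ⟨i, j, a, b, by omega, d⟩
  · rintro ⟨i, j, a, b, c, d⟩; exact ⟨i, j, a, b, by omega, d⟩

-- ===== VERDICT (by name: the statement is the Claim_ definition above) =====
theorem find_movies_within_x_minutes_spec : Claim_equal_find_movies_within_x_minutes := by
  intro flight_length movie_runtime_list stretch_space _
  unfold Spec_find_movies_within_x_minutes
  exact fm_agree flight_length movie_runtime_list stretch_space
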